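-- pv_equiv track=rewrite | github.com/cengman2017/Personal_Projects | Crypto/functions.py | is_smooth_dixon
-- ===== SOURCE A (Python) =====
-- def gcd(a, b):
--     if b > a:
--         return gcd(b, a)
--     else:
--         while b != 0:
--             r = a % b
--             a = b
--             b = r
--         return a
--
-- def is_smooth_dixon(n, baseproduct):
--     if n == 1:
--         return True
--
--     m = n
--     e = gcd(m, baseproduct)
--
--     if e <= 1:
--         return False
--
--     rem = 0
--     while rem == 0:
--         mprime = m
--         (m, rem) = divmod(m, e)
--     m = mprime
--
--     return is_smooth_dixon(m, e)
-- ===== SOURCE B (Python) =====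
-- def gcd(a, b):
--     if b > a:
--         return gcd(b, a)
--     else:
--         while b != 0:
--             r = a % b
--             a = b
--             b = r
--         return a
--
-- def is_smooth_dixon(n, baseproduct):
--     m = n
--     while True:
--         g = gcd(m, baseproduct)
--         if g <= 1:
--             break
--         m //= g
--     return m == 1
-- ===== Notes on version B (the rewrite author's own statement) =====
-- stated objective: alternative
-- what changed: Instead of A's recursion that strips ALL factors of e out of m (divmod do-while) and then recurses with the shrinking base e, B runs one loop that divides m once per round by gcd(m, baseproduct) against the fixed baseproduct and tests m == 1 at the end.
import Mathlib
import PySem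

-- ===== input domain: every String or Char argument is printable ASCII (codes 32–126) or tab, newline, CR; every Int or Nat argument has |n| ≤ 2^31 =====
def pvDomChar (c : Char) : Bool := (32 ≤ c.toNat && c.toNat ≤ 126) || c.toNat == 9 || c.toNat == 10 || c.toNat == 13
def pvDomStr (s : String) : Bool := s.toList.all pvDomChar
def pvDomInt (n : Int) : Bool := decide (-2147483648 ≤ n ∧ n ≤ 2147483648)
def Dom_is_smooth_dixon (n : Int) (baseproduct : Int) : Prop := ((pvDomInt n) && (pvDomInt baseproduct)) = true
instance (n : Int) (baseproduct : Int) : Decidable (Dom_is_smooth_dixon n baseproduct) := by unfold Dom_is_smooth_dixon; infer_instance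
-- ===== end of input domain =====

-- B replaces A's strip-all-factors-then-recurse-on-the-shrinking-base scheme by one loop that
-- repeatedly divides m once by gcd(m, baseproduct) (the base never shrinks) and tests m == 1 at
-- the end; same return value, no speed claim.

-- termination helper for the gcd loop (cited by name in decreasing_by)
theorem pv_mod_natAbs_lt (a b : Int) (h : b ≠ 0) : (PySem.Int.mod a b).natAbs < b.natAbs := by
  rcases lt_or_gt_of_ne h with hb | hb
  · have h1 := PySem.Int.mod_neg_bounds a hb
    omega
  · have h1 := PySem.Int.mod_nonneg a hb
    have h2 := PySem.Int.mod_lt a hb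
    omega

-- ===== PORT A =====
-- shared helper gcd(a, b) (identical source text in Source A and Source B):
-- 'while b != 0: r = a % b; a = b; b = r; return a'
def py_gcd_loop (a b : Int) : Int :=
  if _h : b = 0 then a else py_gcd_loop b (PySem.Int.mod a b)
termination_by b.natAbs
decreasing_by exact pv_mod_natAbs_lt a b _h

-- gcd(a, b): the single recursive call gcd(b, a) (taken when b > a) immediately
-- falls into the while loop, so it is inlined as the second branch.
def py_gcd (a b : Int) : Int :=
  if b > a then py_gcd_loop b a else py_gcd_loop a b

-- A's do-while: 'rem = 0; while rem == 0: mprime = m; (m, rem) = divmod(m, e); m = mprime'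
-- fuel makes the recursion total; it is never exhausted on inputs where the Python loop terminates
def stripA : Nat → Int → Int → Int
  | 0, m, _ => m
  | f + 1, m, e =>
    match PySem.Int.divmod? m e with
    | none => m          -- unreachable at call sites (e > 1 there)
    | some (q, r) => if r = 0 then stripA f q e else m

def isSmoothA : Nat → Int → Int → Bool
  | 0, _, _ => true      -- fuel exhaustion, unreached inside Pre_
  | f + 1, n, bp =>
    if n = 1 then true
    else
      let e := py_gcd n bp
      if e ≤ 1 then false
      else isSmoothA f (stripA (n.natAbs + 1) n e) e

def is_smooth_dixon (n : Int) (baseproduct : Int) : Bool :=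
  isSmoothA (n.natAbs + 1) n baseproduct

-- ===== PORT B =====
-- B's loop: 'while True: g = gcd(m, baseproduct); if g <= 1: break; m //= g', returning the final m;
-- fuel makes it total, never exhausted where the Python loop terminates (inside Pre_)
def smoothBFinal : Nat → Int → Int → Int
  | 0, m, _ => m
  | f + 1, m, bp =>
    let g := py_gcd m bp
    if 1 < g then smoothBFinal f (PySem.Int.floordiv m g) bp else m

-- 'return m == 1'
def is_smooth_dixon_alt (n : Int) (baseproduct : Int) : Bool :=
  smoothBFinal (n.natAbs + 1) n baseproduct == 1

-- ===== PRECONDITION & SPEC =====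
-- Pre_ excludes exactly n = 0 with baseproduct > 1, where the Python A loops forever
-- (divmod of zero by e keeps yielding a zero remainder); B's Python also loops forever there.
def Pre_is_smooth_dixon (n : Int) (baseproduct : Int) : Prop := ¬ (n = 0 ∧ 1 < baseproduct)
instance (n : Int) (baseproduct : Int) : Decidable (Pre_is_smooth_dixon n baseproduct) := by unfold Pre_is_smooth_dixon; infer_instance
def pvWitness_is_smooth_dixon : Int × Int := (12, 6)

def Spec_is_smooth_dixon (n : Int) (baseproduct : Int) (out : Bool) : Prop := out = is_smooth_dixon_alt n baseproduct
instance (n : Int) (baseproduct : Int) (out : Bool) : Decidable (Spec_is_smooth_dixon n baseproduct out) := by unfold Spec_is_smooth_dixon; infer_instance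

-- ===== CLAIM =====
def Claim_equal_is_smooth_dixon : Prop := ∀ (n : Int) (baseproduct : Int), Dom_is_smooth_dixon n baseproduct → Pre_is_smooth_dixon n baseproduct → Spec_is_smooth_dixon n baseproduct (is_smooth_dixon n baseproduct)

-- ===== LEMMAS AND PROOFS =====

-- gcd loop, negative second argument: the result is negative (Python % keeps the divisor's sign)
theorem py_gcd_loop_neg (a b : Int) (hb : b < 0) : py_gcd_loop a b < 0 := by
  induction a, b using py_gcd_loop.induct with
  | case1 a => omega
  | case2 a b h ih =>
    rw [py_gcd_loop]
    simp only [h, dite_false]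
    by_cases hr : PySem.Int.mod a b = 0
    · rw [py_gcd_loop]; simp [hr, hb]
    · exact ih (by have := PySem.Int.mod_neg_bounds a hb; omega)

-- gcd loop on nonnegative arguments computes the mathematical gcd
theorem py_gcd_loop_nonneg (a b : Int) (ha : 0 ≤ a) (hb : 0 ≤ b) :
    py_gcd_loop a b = (Int.gcd a b : Int) := by
  induction a, b using py_gcd_loop.induct with
  | case1 a => rw [py_gcd_loop]; simp [Int.natAbs_of_nonneg ha]
  | case2 a b h ih =>
    have hbpos : 0 < b := by omega
    rw [py_gcd_loop]
    simp only [h, dite_false]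
    rw [ih hb (PySem.Int.mod_nonneg a hbpos),
        PySem.Int.mod_eq_emod_of_pos hbpos, Int.gcd_comm b, Int.gcd_emod]

theorem py_gcd_neg (a b : Int) (h : a < 0 ∨ b < 0) : py_gcd a b < 0 := by
  unfold py_gcd
  split
  · exact py_gcd_loop_neg b a (by omega)
  · exact py_gcd_loop_neg a b (by omega)

theorem py_gcd_nonneg_eq (a b : Int) (ha : 0 ≤ a) (hb : 0 ≤ b) :
    py_gcd a b = (Int.gcd a b : Int) := by
  unfold py_gcd
  split
  · rw [py_gcd_loop_nonneg b a hb ha, Int.gcd_comm]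
  · exact py_gcd_loop_nonneg a b ha hb

-- the smoothness predicate both programs decide: every prime factor of m divides bp
def SmoothP (m bp : Int) : Prop := ∀ p : ℕ, p.Prime → p ∣ m.natAbs → p ∣ bp.natAbs

theorem smoothP_one (bp : Int) : SmoothP 1 bp := by
  intro p hp hd
  simp only [Int.natAbs_one, Nat.dvd_one] at hd
  exact absurd hd hp.ne_one

theorem gcd_two_le_of_smoothP (m bp : Int) (hm : 1 < m) (hP : SmoothP m bp) :
    2 ≤ Int.gcd m bp := by
  obtain ⟨p, hp, hd⟩ := Nat.exists_prime_and_dvd (n := m.natAbs) (by omega)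
  have hdg : p ∣ Int.gcd m bp := Nat.dvd_gcd hd (hP p hp hd)
  have hne : Int.gcd m bp ≠ 0 := fun h => by
    have := (Int.gcd_eq_zero_iff).mp h
    omega
  have := Nat.le_of_dvd (by omega) hdg
  have := hp.two_le
  omega

theorem smoothP_of_not_gcd (m bp : Int) (hm : 1 < m) (h : Int.gcd m bp ≤ 1) :
    ¬ SmoothP m bp := fun hP => by have := gcd_two_le_of_smoothP m bp hm hP; omega

-- exact floor quotient of a known multiple
theorem pv_floordiv_mul (e q : Int) (hne : e ≠ 0) : PySem.Int.floordiv (e * q) e = q := by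
  have h1 := PySem.Int.floordiv_mul_add_mod (e * q) e
  have hr : PySem.Int.mod (e * q) e = 0 :=
    (PySem.Int.mod_eq_zero_iff_dvd _ _).mpr ⟨q, rfl⟩
  rw [hr, add_zero] at h1
  exact mul_right_cancel₀ hne (by rw [h1]; ring)

theorem pv_divmod_eq (m e : Int) (hne : e ≠ 0) :
    PySem.Int.divmod? m e = some (PySem.Int.floordiv m e, PySem.Int.mod m e) := by
  simp [PySem.Int.divmod?, PySem.Int.floordiv, PySem.Int.mod, hne]

-- strip result: divides m, at least 1, and m divides r * e^k for some k
theorem stripA_spec (f : Nat) (m e : Int) (hm : 1 ≤ m) (he : 2 ≤ e) :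
    1 ≤ stripA f m e ∧ stripA f m e ∣ m ∧ ∃ k : ℕ, m ∣ stripA f m e * e ^ k := by
  induction f generalizing m with
  | zero => exact ⟨hm, dvd_refl m, 0, by simp [stripA]⟩
  | succ f ih =>
    have hne : e ≠ 0 := by omega
    simp only [stripA, pv_divmod_eq m e hne]
    by_cases hr : PySem.Int.mod m e = 0
    · rw [if_pos hr]
      obtain ⟨q, hq⟩ := (PySem.Int.mod_eq_zero_iff_dvd m e).mp hr
      have hqdef : PySem.Int.floordiv m e = q := by rw [hq]; exact pv_floordiv_mul e q hne
      have hq1 : 1 ≤ q := by nlinarith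
      rw [hqdef]
      obtain ⟨h1, h2, k, h3⟩ := ih q hq1
      refine ⟨h1, h2.trans ⟨e, by rw [hq]; ring⟩, k + 1, ?_⟩
      rw [hq]
      calc e * q ∣ e * (stripA f q e * e ^ k) := mul_dvd_mul_left e h3
        _ = stripA f q e * e ^ (k + 1) := by ring
    · rw [if_neg hr]
      exact ⟨hm, dvd_refl m, 0, by simp⟩

-- strip strictly decreases m when e divides m
theorem stripA_lt (f : Nat) (m e : Int) (hm : 1 ≤ m) (he : 2 ≤ e) (hdvd : e ∣ m) :
    stripA (f + 1) m e < m := by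
  have hne : e ≠ 0 := by omega
  obtain ⟨q, hq⟩ := hdvd
  have hr : PySem.Int.mod m e = 0 := (PySem.Int.mod_eq_zero_iff_dvd m e).mpr ⟨q, hq⟩
  have hqdef : PySem.Int.floordiv m e = q := by rw [hq]; exact pv_floordiv_mul e q hne
  have hq1 : 1 ≤ q := by nlinarith
  simp only [stripA, pv_divmod_eq m e hne]
  rw [if_pos hr, hqdef]
  obtain ⟨h1, h2, -⟩ := stripA_spec f q e hq1 he
  have hle : stripA f q e ≤ q := Int.le_of_dvd (by omega) h2
  nlinarith

-- A's recursion decides SmoothP on the natural domain (n ≥ 1, baseproduct ≥ 0)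
theorem isSmoothA_iff (f : Nat) (n bp : Int) (hf : n.natAbs ≤ f) (hn : 1 ≤ n) (hbp : 0 ≤ bp) :
    (isSmoothA f n bp = true ↔ SmoothP n bp) := by
  induction f generalizing n bp with
  | zero => omega
  | succ f ih =>
    simp only [isSmoothA]
    by_cases h1 : n = 1
    · subst h1; simp [smoothP_one]
    · have hn2 : 2 ≤ n := by omega
      rw [if_neg h1]
      have hge := py_gcd_nonneg_eq n bp (by omega) hbp
      by_cases he : py_gcd n bp ≤ 1
      · rw [if_pos he]
        simp only [Bool.false_eq_true, false_iff]
        exact smoothP_of_not_gcd n bp (by omega) (by omega)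
      · rw [if_neg he]
        have he2 : 2 ≤ py_gcd n bp := by omega
        have hEn : (py_gcd n bp).natAbs = Int.gcd n bp := by rw [hge]; simp
        have hedvd : py_gcd n bp ∣ n := by rw [hge]; exact Int.gcd_dvd_left _ _
        have hebp : (py_gcd n bp).natAbs ∣ bp.natAbs := by
          rw [hEn]; exact Int.natAbs_dvd_natAbs.mpr (Int.gcd_dvd_right _ _)
        obtain ⟨hm1, hm2, k, hm3⟩ := stripA_spec (n.natAbs + 1) n (py_gcd n bp) (by omega) he2
        have hlt : stripA (n.natAbs + 1) n (py_gcd n bp) < n := by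
          have := stripA_lt n.natAbs n (py_gcd n bp) (by omega) he2 hedvd
          simpa using this
        rw [ih (stripA (n.natAbs + 1) n (py_gcd n bp)) (py_gcd n bp) (by omega) hm1 (by omega)]
        constructor
        · intro hP p hp hd
          have hdm : p ∣ (stripA (n.natAbs + 1) n (py_gcd n bp) * (py_gcd n bp) ^ k).natAbs :=
            dvd_trans hd (Int.natAbs_dvd_natAbs.mpr hm3)
          rw [Int.natAbs_mul, Int.natAbs_pow] at hdm
          rcases (Nat.Prime.dvd_mul hp).mp hdm with h | h
          · exact dvd_trans (hP p hp h) hebp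
          · exact dvd_trans (Nat.Prime.dvd_of_dvd_pow hp h) hebp
        · intro hP p hp hd
          have hdn : p ∣ n.natAbs := dvd_trans hd (Int.natAbs_dvd_natAbs.mpr hm2)
          rw [hEn]
          exact Nat.dvd_gcd hdn (hP p hp hdn)

-- B's loop ends at 1 exactly on SmoothP inputs, on the same natural domain
theorem smoothBFinal_iff (f : Nat) (m bp : Int) (hf : m.natAbs ≤ f) (hm : 1 ≤ m) (hbp : 0 ≤ bp) :
    (smoothBFinal f m bp = 1 ↔ SmoothP m bp) := by
  induction f generalizing m with
  | zero => omega
  | succ f ih =>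
    simp only [smoothBFinal]
    have hge := py_gcd_nonneg_eq m bp (by omega) hbp
    by_cases hg : 1 < py_gcd m bp
    · rw [if_pos hg]
      have hEn : (py_gcd m bp).natAbs = Int.gcd m bp := by rw [hge]; simp
      have hgbp : (py_gcd m bp).natAbs ∣ bp.natAbs := by
        rw [hEn]; exact Int.natAbs_dvd_natAbs.mpr (Int.gcd_dvd_right _ _)
      have hgdvd : py_gcd m bp ∣ m := by rw [hge]; exact Int.gcd_dvd_left _ _
      obtain ⟨q, hq⟩ := hgdvd
      have hq1 : 1 ≤ q := by nlinarith
      have hfd : PySem.Int.floordiv m (py_gcd m bp) = q := by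
        have h0 := pv_floordiv_mul (py_gcd m bp) q (by omega)
        rw [← hq] at h0
        exact h0
      have hqlt : q < m := by nlinarith
      rw [hfd, ih q (by omega) hq1]
      constructor
      · intro hP p hp hd
        have hdm : p ∣ ((py_gcd m bp) * q).natAbs := by rw [← hq]; exact hd
        rw [Int.natAbs_mul] at hdm
        rcases (Nat.Prime.dvd_mul hp).mp hdm with h | h
        · exact dvd_trans h hgbp
        · exact hP p hp h
      · intro hP p hp hd
        exact hP p hp (dvd_trans hd (Int.natAbs_dvd_natAbs.mpr (by rw [hq]; exact dvd_mul_left q (py_gcd m bp))))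
    · rw [if_neg hg]
      constructor
      · intro h; rw [h]; exact smoothP_one bp
      · intro hP
        by_contra hne
        have h1 : 1 < m := by omega
        have := gcd_two_le_of_smoothP m bp h1 hP
        omega

-- ===== VERDICT =====
theorem is_smooth_dixon_spec : Claim_equal_is_smooth_dixon := by
  intro n bp _ hpre
  unfold Spec_is_smooth_dixon is_smooth_dixon is_smooth_dixon_alt
  rcases le_or_gt n 0 with hn | hn
  · -- n ≤ 0: gcd(n, bp) ≤ 1 (Pre_ rules out n = 0 with bp > 1), so A returns False and B keeps m = n ≠ 1
    have hg : py_gcd n bp ≤ 1 := by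
      rcases hn.lt_or_eq with hn0 | hn0
      · have := py_gcd_neg n bp (Or.inl hn0); omega
      · rcases le_or_gt 0 bp with hbp | hbp
        · have hbp1 : bp ≤ 1 := by
            unfold Pre_is_smooth_dixon at hpre
            omega
          rw [hn0, py_gcd_nonneg_eq 0 bp le_rfl hbp]
          have : Int.gcd 0 bp = bp.natAbs := Int.gcd_zero_left bp
          omega
        · have := py_gcd_neg n bp (Or.inr hbp); omega
    simp only [isSmoothA, smoothBFinal]
    rw [if_neg (show ¬ n = 1 by omega), if_pos hg, if_neg (show ¬ 1 < py_gcd n bp by omega)]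
    symm
    rw [beq_eq_false_iff_ne]
    omega
  · rcases le_or_gt 0 bp with hbp | hbp
    · -- the main region n ≥ 1, bp ≥ 0: both sides decide SmoothP
      have hA := isSmoothA_iff (n.natAbs + 1) n bp (by omega) (by omega) hbp
      have hB := smoothBFinal_iff (n.natAbs + 1) n bp (by omega) (by omega) hbp
      by_cases hP : SmoothP n bp
      · rw [hA.mpr hP, hB.mpr hP]; decide
      · have h1 : isSmoothA (n.natAbs + 1) n bp = false :=
          Bool.eq_false_iff.mpr (fun h => hP (hA.mp h))
        rw [h1]
        symm
        rw [beq_eq_false_iff_ne]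
        exact fun h => hP (hB.mp h)
    · -- bp < 0: gcd is negative, so A returns (n == 1) at once and B's loop breaks immediately
      have hg : py_gcd n bp < 0 := py_gcd_neg n bp (Or.inr hbp)
      simp only [isSmoothA, smoothBFinal]
      rw [if_neg (show ¬ 1 < py_gcd n bp by omega)]
      by_cases h1 : n = 1
      · rw [if_pos h1, h1]; decide
      · rw [if_neg h1, if_pos (show py_gcd n bp ≤ 1 by omega)]
        symm
        rw [beq_eq_false_iff_ne]
        omega
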